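-- pv_equiv track=rewrite | github.com/john35452/GFG_Weekly_Coding_Contest | gfg-weekly-coding-contest-73/Dominant Pairs.py | dominantPairs
-- ===== SOURCE A (Python) =====
-- from typing import List
--
-- def dominantPairs(n : int, arr : List[int]) -> int:
--     # code here
--     half = n // 2
--     left = arr[:half]
--     right = arr[half:]
--     left.sort()
--     right.sort()
--     ans = 0
--     i = 0
--     for j in range(len(right)):
--         while i < half and left[i] < 5*right[j]:
--             i += 1
--         ans += (half - i)
--     return ans
-- ===== SOURCE B (Python) =====
-- from typing import List
--
-- def dominantPairs(n : int, arr : List[int]) -> int: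
--     half = n // 2
--     left = sorted(arr[:half])
--     right = arr[half:]          # no need to sort: each element is handled independently
--     ans = 0
--     for r in right:
--         x = 5 * r
--         lo, hi = 0, len(left)   # hand-written bisect_left(left, x)
--         while lo < hi:
--             mid = (lo + hi) // 2
--             if left[mid] < x:
--                 lo = mid + 1
--             else:
--                 hi = mid
--         ans += half - lo
--     return ans
-- ===== Notes on version B (the rewrite author's own statement) =====
-- stated objective: alternative
-- what changed: Replaces A's coordinated monotonic two-pointer sweep over BOTH sorted halves by an independent binary search (hand-written bisect_left) into the sorted left half for each right element, so the right half no longer needs to be sorted at all.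
-- outside the precondition, e.g. on dominantPairs(-2, [0, 1, 10]): A returns -1, B returns -3
import Mathlib
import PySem

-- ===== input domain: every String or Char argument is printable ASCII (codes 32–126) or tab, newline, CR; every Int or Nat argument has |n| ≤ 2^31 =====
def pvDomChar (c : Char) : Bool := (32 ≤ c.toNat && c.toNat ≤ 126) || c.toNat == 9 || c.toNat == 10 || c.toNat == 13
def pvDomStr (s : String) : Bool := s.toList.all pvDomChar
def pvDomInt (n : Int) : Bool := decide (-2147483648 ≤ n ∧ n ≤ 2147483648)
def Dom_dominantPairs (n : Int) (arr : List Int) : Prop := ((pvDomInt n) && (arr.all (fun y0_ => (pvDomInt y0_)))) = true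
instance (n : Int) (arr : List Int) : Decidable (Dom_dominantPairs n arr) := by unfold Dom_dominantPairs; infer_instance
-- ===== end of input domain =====

-- B replaces A's two-pointer sweep over both sorted halves by an independent binary search
-- into the sorted left half per (unsorted) right element; equal cost, different algorithm.

-- ===== PORT A =====
-- the inner 'while i < half and left[i] < 5*right[j]: i += 1' (fueled; the none branch is an
-- IndexError, unreachable on inputs where A returns)
def pvAdvA (left : List Int) (half x : Int) : Nat → Int → Int
  | 0, i => i
  | fuel+1, i =>
    if i < half then
      match PySem.List.pyGet? left i with
      | some v => if v < x then pvAdvA left half x fuel (i+1) else i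
      | none => i
    else i

def dominantPairs (n : Int) (arr : List Int) : Int :=
  let half := PySem.Int.floordiv n 2
  let left := PySem.List.sorted (PySem.List.slice arr none (some half)) (fun x => x) false
  let right := PySem.List.sorted (PySem.List.slice arr (some half) none) (fun x => x) false
  let st := right.foldl (fun (st : Int × Int) r =>
      let i := pvAdvA left half (5*r) (left.length + 1) st.1
      (i, st.2 + (half - i))) ((0 : Int), (0 : Int))
  st.2

-- ===== PORT B =====
-- hand-written bisect_left loop from Source B (recursion on hi - lo; left[mid] always in range)
def pvBisect (left : List Int) (x : Int) (lo hi : Nat) : Nat :=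
  if _h : lo < hi then
    let mid := (lo + hi) / 2
    if left.getD mid 0 < x then pvBisect left x (mid+1) hi
    else pvBisect left x lo mid
  else lo
termination_by hi - lo
decreasing_by all_goals omega

def dominantPairs_alt (n : Int) (arr : List Int) : Int :=
  let half := PySem.Int.floordiv n 2
  let left := PySem.List.sorted (PySem.List.slice arr none (some half)) (fun x => x) false
  let right := PySem.List.slice arr (some half) none
  right.foldl (fun ans r => ans + (half - (pvBisect left (5*r) 0 left.length : Int))) 0

-- ===== PRECONDITION & SPEC =====
-- Pre_ restricts to the natural domain n ≥ 0 (n is a length): for n < 0 A still returns, but its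
-- value (the pointer never moves, so i stays 0 against a truncated left) is an artefact of the
-- implementation on a meaningless input, and B's natural binary search returns something else.
def Pre_dominantPairs (n : Int) (arr : List Int) : Prop := 0 ≤ n
instance (n : Int) (arr : List Int) : Decidable (Pre_dominantPairs n arr) := by
  unfold Pre_dominantPairs; infer_instance

def pvWitness_dominantPairs : Int × List Int := (4, [10, 2, 1, 1])

def Spec_dominantPairs (n : Int) (arr : List Int) (out : Int) : Prop := out = dominantPairs_alt n arr
instance (n : Int) (arr : List Int) (out : Int) : Decidable (Spec_dominantPairs n arr out) := by unfold Spec_dominantPairs; infer_instance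

-- ===== CLAIM (what is proved, stated in full; the proofs are below) =====
def Claim_equal_dominantPairs : Prop := ∀ (n : Int) (arr : List Int), Dom_dominantPairs n arr → Pre_dominantPairs n arr → Spec_dominantPairs n arr (dominantPairs n arr)

-- ===== LEMMAS AND PROOFS =====

-- number of elements of left strictly below x
def pvCnt (left : List Int) (x : Int) : Nat := (left.filter (fun l => decide (l < x))).length

theorem pvCnt_le_length (left : List Int) (x : Int) : pvCnt left x ≤ left.length :=
  List.length_filter_le _ _

theorem pvCnt_mono (left : List Int) {x y : Int} (h : x ≤ y) : pvCnt left x ≤ pvCnt left y := by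
  exact List.Sublist.length_le (List.monotone_filter_right _ (by intro a ha; simp_all; omega))

-- on a sorted list, membership below index pvCnt characterises `< x`
theorem pvCnt_iff (left : List Int) (hs : left.Pairwise (· ≤ ·)) (x : Int) :
    ∀ i (h : i < left.length), (left[i] < x ↔ i < pvCnt left x) := by
  induction left with
  | nil => intro i h; simp at h
  | cons a t ih =>
    intro i h
    have hpa := (List.pairwise_cons.mp hs).1
    have hpt := (List.pairwise_cons.mp hs).2
    by_cases hax : a < x
    · have hc : pvCnt (a :: t) x = pvCnt t x + 1 := by
        simp [pvCnt, List.filter, hax]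
      cases i with
      | zero => simpa [hc] using hax
      | succ j =>
        have hj : j < t.length := by simpa using h
        have hiff := ih hpt j hj
        simp only [List.getElem_cons_succ, hc]
        omega
    · have hnil : (a :: t).filter (fun l => decide (l < x)) = [] := by
        rw [List.filter_eq_nil_iff]
        intro b hb
        simp only [decide_eq_true_eq, not_lt]
        rcases List.mem_cons.mp hb with rfl | hb
        · omega
        · have := hpa b hb; omega
      have hc : pvCnt (a :: t) x = 0 := by simp [pvCnt, hnil]
      cases i with
      | zero =>
        simp only [List.getElem_cons_zero, hc]
        constructor
        · intro hlt; omega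
        · intro hlt; omega
      | succ j =>
        have hj : j < t.length := by simpa using h
        have hbj : a ≤ t[j] := hpa _ (List.getElem_mem hj)
        simp only [List.getElem_cons_succ, hc]
        constructor
        · intro hlt; omega
        · intro hlt; omega

theorem pvBisect_eq (left : List Int) (x : Int) (hs : left.Pairwise (· ≤ ·)) :
    ∀ k lo hi, hi - lo ≤ k → hi ≤ left.length → lo ≤ pvCnt left x → pvCnt left x ≤ hi →
      pvBisect left x lo hi = pvCnt left x := by
  intro k
  induction k with
  | zero =>
    intro lo hi hk hlen hlo hhi
    have : ¬ lo < hi := by omega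
    rw [pvBisect]; simp [this]; omega
  | succ k ih =>
    intro lo hi hk hlen hlo hhi
    by_cases h : lo < hi
    · rw [pvBisect]
      simp only [h, dif_pos]
      set mid := (lo + hi) / 2 with hmid
      have hmlt : mid < left.length := by omega
      have hget : left.getD mid 0 = left[mid] := List.getD_eq_getElem _ _ hmlt
      have hiff := pvCnt_iff left hs x mid hmlt
      by_cases hv : left[mid] < x
      · have hcm : mid < pvCnt left x := hiff.mp hv
        rw [hget]
        simp only [hv, if_pos]
        exact ih (mid+1) hi (by omega) hlen (by omega) hhi
      · have hcm : pvCnt left x ≤ mid := by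
          by_contra hc; exact hv (hiff.mpr (by omega))
        rw [hget]
        simp only [hv, if_false]
        exact ih lo mid (by omega) (by omega) hlo (by omega)
    · rw [pvBisect]; simp [h]; omega

theorem pvAdvA_eq (left : List Int) (x : Int) (hs : left.Pairwise (· ≤ ·)) :
    ∀ fuel (i : Int), 0 ≤ i → i ≤ (pvCnt left x : Int) →
      left.length + 1 - i.toNat ≤ fuel →
      pvAdvA left (left.length : Int) x fuel i = (pvCnt left x : Int) := by
  intro fuel
  induction fuel with
  | zero =>
    intro i h0 hle hf
    have := pvCnt_le_length left x
    omega
  | succ fuel ih =>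
    intro i h0 hle hf
    have hcl := pvCnt_le_length left x
    rw [pvAdvA]
    by_cases hih : i < (left.length : Int)
    · simp only [hih, if_pos]
      have hin : i.toNat < left.length := by omega
      have hget : PySem.List.pyGet? left i = some left[i.toNat] :=
        PySem.List.pyGet?_eq_some_getElem left h0 hih
      rw [hget]
      have hiff := pvCnt_iff left hs x i.toNat hin
      by_cases hv : left[i.toNat] < x
      · have : i.toNat < pvCnt left x := hiff.mp hv
        simp only [hv, if_pos]
        exact ih (i+1) (by omega) (by omega) (by omega)
      · have : pvCnt left x ≤ i.toNat := by
          by_contra hc; exact hv (hiff.mpr (by omega))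
        simp only [hv, if_false]
        omega
    · simp only [hih, if_false]
      omega

-- A's fold, with the counter invariant
theorem pvFoldA_eq (left : List Int) (hs : left.Pairwise (· ≤ ·)) :
    ∀ (rs : List Int) (i0 ans : Int), rs.Pairwise (· ≤ ·) → 0 ≤ i0 →
      (∀ r ∈ rs, i0 ≤ (pvCnt left (5*r) : Int)) →
      (rs.foldl (fun (st : Int × Int) r =>
          (pvAdvA left (left.length : Int) (5*r) (left.length + 1) st.1,
           st.2 + ((left.length : Int) - pvAdvA left (left.length : Int) (5*r) (left.length + 1) st.1))) (i0, ans)).2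
        = ans + (rs.map (fun r => (left.length : Int) - (pvCnt left (5*r) : Nat))).sum := by
  intro rs
  induction rs with
  | nil => intro i0 ans _ _ _; simp
  | cons r rs ih =>
    intro i0 ans hp h0 hinv
    have hadv : pvAdvA left (left.length : Int) (5*r) (left.length + 1) i0
        = (pvCnt left (5*r) : Int) :=
      pvAdvA_eq left (5*r) hs _ i0 h0 (hinv r (by simp)) (by omega)
    simp only [List.foldl_cons, List.map_cons, List.sum_cons, hadv]
    rw [ih _ _ (List.pairwise_cons.mp hp).2 (by positivity)
        (by
          intro r' hr'
          have hrr : r ≤ r' := (List.pairwise_cons.mp hp).1 r' hr'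
          exact_mod_cast pvCnt_mono left (by omega))]
    ring

-- B's fold
theorem pvFoldB_eq (left : List Int) :
    ∀ (rs : List Int) (ans : Int),
      rs.foldl (fun ans r => ans + ((left.length : Int) - (pvBisect left (5*r) 0 left.length : Int))) ans
        = ans + (rs.map (fun r => (left.length : Int) - (pvBisect left (5*r) 0 left.length : Nat))).sum := by
  intro rs
  induction rs with
  | nil => intro ans; simp
  | cons r rs ih => intro ans; simp only [List.foldl_cons, List.map_cons, List.sum_cons, ih]; ring

-- ===== VERDICT (by name: the statement is the Claim_ definition above) =====
theorem dominantPairs_spec : Claim_equal_dominantPairs := by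
  intro n arr _ hpre
  have h0 : (0:Int) ≤ PySem.Int.floordiv n 2 := by
    rw [PySem.Int.floordiv_eq_ediv_of_pos (by omega)]
    exact Int.ediv_nonneg hpre (by omega)
  unfold Spec_dominantPairs dominantPairs dominantPairs_alt
  simp only [PySem.List.slice_to arr h0, PySem.List.slice_from arr h0]
  set half := PySem.Int.floordiv n 2 with hhalfdef
  set left := PySem.List.sorted (arr.take half.toNat) (fun x => x) false with hleftdef
  by_cases hc : arr.length ≤ half.toNat
  · have hnil : arr.drop half.toNat = [] := List.drop_eq_nil_of_le hc
    rw [hnil]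
    have : PySem.List.sorted ([] : List Int) (fun x => x) false = [] := rfl
    rw [this]
    simp
  · have hlen : left.length = half.toNat := by
      rw [hleftdef, PySem.List.length_sorted, List.length_take]
      omega
    have hhalf : half = (left.length : Int) := by
      rw [hlen, Int.toNat_of_nonneg h0]
    have hsL : left.Pairwise (· ≤ ·) := PySem.List.sorted_pairwise _ _
    rw [hhalf]
    rw [pvFoldA_eq left hsL _ 0 0 (PySem.List.sorted_pairwise _ _) le_rfl
        (by intro r _; exact Int.natCast_nonneg _)]
    rw [pvFoldB_eq left _ 0]
    have hfun : ∀ r : Int,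
        ((left.length : Int) - (pvBisect left (5*r) 0 left.length : Nat))
          = ((left.length : Int) - (pvCnt left (5*r) : Nat)) := by
      intro r
      rw [pvBisect_eq left (5*r) hsL left.length 0 left.length (by omega) le_rfl
          (Nat.zero_le _) (pvCnt_le_length _ _)]
    simp only [hfun]
    rw [List.Perm.sum_eq (List.Perm.map _ (PySem.List.sorted_perm (arr.drop (((left.length : Int)).toNat)) _ _))]
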